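-- pv_equiv track=rewrite | github.com/uriva/subject_extraction | eval.py | words_diff
-- ===== SOURCE A (Python) =====
-- def words_diff(w1, w2):
--     i = 0
--     while i < len(w1) and i < len(w2) and w1[i] == w2[i]:
--         i += 1
--     if i > 0:
--         if i == len(w1):
--             return w2[i:]
--         if i == len(w2):
--             return w2[i:]
-- ===== SOURCE B (Python) =====
-- def words_diff(w1, w2):
--     if w1 and w2[:len(w1)] == w1:
--         return w2[len(w1):]
--     if w2 and w1[:len(w2)] == w2:
--         return []
-- ===== Notes on version B (the rewrite author's own statement) =====
-- stated objective: idiomatic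
-- what changed: Replaced the explicit index loop that counts matching leading elements with two direct slice-comparison prefix tests, returning w2[len(w1):] when w1 is a nonempty prefix of w2 and [] when w2 is a nonempty prefix of w1.
import Mathlib
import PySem

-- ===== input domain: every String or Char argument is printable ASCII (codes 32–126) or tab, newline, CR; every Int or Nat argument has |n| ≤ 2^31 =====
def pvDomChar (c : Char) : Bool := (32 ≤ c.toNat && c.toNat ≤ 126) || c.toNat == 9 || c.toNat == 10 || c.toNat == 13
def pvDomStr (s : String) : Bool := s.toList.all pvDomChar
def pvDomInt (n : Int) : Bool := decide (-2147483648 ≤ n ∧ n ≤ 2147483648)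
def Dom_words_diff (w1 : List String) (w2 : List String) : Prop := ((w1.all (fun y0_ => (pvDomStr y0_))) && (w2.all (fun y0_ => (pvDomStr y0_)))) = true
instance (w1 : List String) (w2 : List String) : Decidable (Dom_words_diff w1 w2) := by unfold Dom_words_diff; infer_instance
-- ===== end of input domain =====

-- B replaces A's explicit common-prefix index loop with two direct slice-comparison prefix tests; idiomatic, same cost.


-- ===== PORT A =====
def wdLoop (w1 w2 : List String) (i : Nat) : Nat :=
  if h1 : i < w1.length then
    if h2 : i < w2.length then
      if w1[i] = w2[i] then wdLoop w1 w2 (i+1) else i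
    else i
  else i
termination_by w1.length - i

-- Port of A: the while loop counts matching leading elements (i stays ≥ 0, so Nat is exact);
-- w2[i:] with i ≥ 0 is List.drop i.
def words_diff (w1 : List String) (w2 : List String) : Option (List String) :=
  let i := wdLoop w1 w2 0
  if i > 0 then
    if i = w1.length then some (w2.drop i)
    else if i = w2.length then some (w2.drop i)
    else none
  else none

-- ===== PORT B =====
-- Port of B: slice comparison w2[:len(w1)] == w1 is List.take, w2[len(w1):] is List.drop (nonneg bounds).
def words_diff_alt (w1 : List String) (w2 : List String) : Option (List String) :=
  if w1 ≠ [] ∧ w2.take w1.length = w1 then some (w2.drop w1.length)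
  else if w2 ≠ [] ∧ w1.take w2.length = w2 then some []
  else none

-- ===== PRECONDITION & SPEC =====
def Spec_words_diff (w1 : List String) (w2 : List String) (out : Option (List String)) : Prop := out = words_diff_alt w1 w2
instance (w1 : List String) (w2 : List String) (out : Option (List String)) : Decidable (Spec_words_diff w1 w2 out) := by unfold Spec_words_diff; infer_instance

-- ===== CLAIM (what is proved, stated in full; the proofs are below) =====
def Claim_equal_words_diff : Prop := ∀ (w1 : List String) (w2 : List String), Dom_words_diff w1 w2 → Spec_words_diff w1 w2 (words_diff w1 w2)

-- ===== LEMMAS AND PROOFS =====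

def cpLen : List String → List String → Nat
  | a::xs, b::ys => if a = b then cpLen xs ys + 1 else 0
  | _, _ => 0

theorem wdLoop_shift (a b : String) (xs ys : List String) (i : Nat) :
    wdLoop (a::xs) (b::ys) (i+1) = wdLoop xs ys i + 1 := by
  fun_induction wdLoop xs ys i <;> (rw [wdLoop]; simp_all)

theorem wdLoop_eq_cpLen (w1 w2 : List String) : wdLoop w1 w2 0 = cpLen w1 w2 := by
  induction w1 generalizing w2 with
  | nil => rw [wdLoop]; simp [cpLen]
  | cons a xs ih =>
      cases w2 with
      | nil => rw [wdLoop]; simp [cpLen]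
      | cons b ys =>
          rw [wdLoop]
          by_cases hab : a = b
          · simp [hab, cpLen, wdLoop_shift, ih]
          · simp [hab, cpLen]

theorem cpLen_left (w1 w2 : List String) :
    cpLen w1 w2 = w1.length ↔ w2.take w1.length = w1 := by
  induction w1 generalizing w2 with
  | nil => simp [cpLen]
  | cons a xs ih =>
      cases w2 with
      | nil => simp [cpLen]
      | cons b ys =>
          by_cases hab : a = b
          · simp [cpLen, hab, ih]
          · simp [cpLen, hab]
            exact fun h => absurd h (fun h' => hab h'.symm)

theorem cpLen_comm (w1 w2 : List String) : cpLen w1 w2 = cpLen w2 w1 := by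
  induction w1 generalizing w2 with
  | nil => cases w2 <;> simp [cpLen]
  | cons a xs ih =>
      cases w2 with
      | nil => simp [cpLen]
      | cons b ys =>
          by_cases hab : a = b
          · simp [cpLen, hab, ih]
          · simp [cpLen, hab]
            exact fun h => hab h.symm

theorem cpLen_right (w1 w2 : List String) :
    cpLen w1 w2 = w2.length ↔ w1.take w2.length = w2 := by
  rw [cpLen_comm]; exact cpLen_left w2 w1

theorem words_diff_spec : Claim_equal_words_diff := by
  intro w1 w2 _
  unfold Spec_words_diff words_diff words_diff_alt
  rw [wdLoop_eq_cpLen]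
  by_cases h0 : cpLen w1 w2 > 0
  · by_cases h1 : cpLen w1 w2 = w1.length
    · have hp : w2.take w1.length = w1 := (cpLen_left w1 w2).mp h1
      have hne : w1 ≠ [] := List.ne_nil_of_length_pos (h1 ▸ h0)
      simp [h1, hp, hne]
    · have hp1 : ¬ (w2.take w1.length = w1) := fun h => h1 ((cpLen_left w1 w2).mpr h)
      by_cases h2 : cpLen w1 w2 = w2.length
      · have hp : w1.take w2.length = w2 := (cpLen_right w1 w2).mp h2
        have hne : w2 ≠ [] := List.ne_nil_of_length_pos (h2 ▸ h0)
        simp [h2, hp, hp1, hne, List.drop_length]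
      · have hp2 : ¬ (w1.take w2.length = w2) := fun h => h2 ((cpLen_right w1 w2).mpr h)
        simp [h0, h1, h2, hp1, hp2]
  · have hz : cpLen w1 w2 = 0 := by omega
    have hp1 : ¬ (w1 ≠ [] ∧ w2.take w1.length = w1) := by
      rintro ⟨hne, hp⟩
      have := (cpLen_left w1 w2).mpr hp
      rw [hz] at this
      exact hne (List.length_eq_zero_iff.mp this.symm)
    have hp2 : ¬ (w2 ≠ [] ∧ w1.take w2.length = w2) := by
      rintro ⟨hne, hp⟩
      have := (cpLen_right w1 w2).mpr hp
      rw [hz] at this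
      exact hne (List.length_eq_zero_iff.mp this.symm)
    simp [hz, hp1, hp2]
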